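-- pv_equiv track=rewrite | github.com/beachasaurus-rex/Learning | PythonDataSci/DataParser.py | GetMinErrPrediction
-- ===== SOURCE A (Python) =====
-- def GetMinErrPrediction(fineAggdList):
--     meaList = []
--     for subList in fineAggdList:
--         meaList.append(subList[1])
--
--     minVal = min(meaList)
--     for subList in fineAggdList:
--         if subList[1] == minVal:
--             return subList
-- ===== SOURCE B (Python) =====
-- def GetMinErrPrediction(fineAggdList):
--     best = fineAggdList[0]
--     for subList in fineAggdList[1:]:
--         if subList[1] < best[1]:
--             best = subList
--     return best
-- ===== Notes on version B (the rewrite author's own statement) =====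
-- stated objective: simpler
-- what changed: Single pass keeping the best-so-far sublist (strict < keeps the first tie winner), instead of building an auxiliary list of second elements, taking its min, and rescanning for the first match.
import Mathlib
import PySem

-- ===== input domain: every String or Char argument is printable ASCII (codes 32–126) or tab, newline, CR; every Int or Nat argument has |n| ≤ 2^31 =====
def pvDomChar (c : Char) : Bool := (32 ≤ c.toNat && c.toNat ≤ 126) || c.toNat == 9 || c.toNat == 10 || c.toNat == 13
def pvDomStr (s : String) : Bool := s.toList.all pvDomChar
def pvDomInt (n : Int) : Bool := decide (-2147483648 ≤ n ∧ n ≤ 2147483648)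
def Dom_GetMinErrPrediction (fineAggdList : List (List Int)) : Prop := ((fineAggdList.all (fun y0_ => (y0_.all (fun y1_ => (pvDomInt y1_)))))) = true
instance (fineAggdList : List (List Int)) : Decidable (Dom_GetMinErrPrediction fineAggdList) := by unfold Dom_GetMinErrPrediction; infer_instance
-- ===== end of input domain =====

-- B replaces A's three passes (collect second elements, min, rescan for first match) by one
-- best-so-far pass; objective: simpler. Return-value equivalence only (neither mutates its argument).

-- ===== PORT A =====
-- subList[1]; Pre_ guarantees the index is in range
def pvKeyA (s : List Int) : Int := (PySem.List.pyGet? s 1).getD 0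

def GetMinErrPrediction (fineAggdList : List (List Int)) : List Int :=
  let meaList := fineAggdList.foldl (fun acc subList => acc ++ [pvKeyA subList]) []
  let minVal := (PySem.List.min? meaList (fun x => x)).getD 0
  (fineAggdList.find? (fun subList => pvKeyA subList == minVal)).getD []

-- ===== PORT B =====
def GetMinErrPrediction_alt (fineAggdList : List (List Int)) : List Int :=
  match fineAggdList with
  | [] => []   -- Python B raises IndexError here; outside Pre_
  | best :: rest =>
      rest.foldl
        (fun best subList =>
          if (PySem.List.pyGet? subList 1).getD 0 < (PySem.List.pyGet? best 1).getD 0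
          then subList else best)
        best

-- ===== PRECONDITION & SPEC =====
-- Pre_ excludes exactly the inputs where Python A raises: the empty list (min([]) is a
-- ValueError) and any input containing a sublist of length < 2 (subList[1] is an IndexError).
def Pre_GetMinErrPrediction (fineAggdList : List (List Int)) : Prop :=
  fineAggdList ≠ [] ∧ ∀ s ∈ fineAggdList, 2 ≤ s.length
instance (fineAggdList : List (List Int)) : Decidable (Pre_GetMinErrPrediction fineAggdList) := by
  unfold Pre_GetMinErrPrediction; infer_instance

def pvWitness_GetMinErrPrediction : List (List Int) := [[1, 5], [2, 3], [4, 3]]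

def Spec_GetMinErrPrediction (fineAggdList : List (List Int)) (out : List Int) : Prop := out = GetMinErrPrediction_alt fineAggdList
instance (fineAggdList : List (List Int)) (out : List Int) : Decidable (Spec_GetMinErrPrediction fineAggdList out) := by unfold Spec_GetMinErrPrediction; infer_instance

-- ===== CLAIM (what is proved, stated in full; the proofs are below) =====
def Claim_equal_GetMinErrPrediction : Prop := ∀ (fineAggdList : List (List Int)), Dom_GetMinErrPrediction fineAggdList → Pre_GetMinErrPrediction fineAggdList → Spec_GetMinErrPrediction fineAggdList (GetMinErrPrediction fineAggdList)

-- ===== LEMMAS AND PROOFS =====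

theorem pvFoldl_append_eq_map (l : List (List Int)) (acc : List Int) :
    l.foldl (fun acc subList => acc ++ [pvKeyA subList]) acc = acc ++ l.map pvKeyA := by
  induction l generalizing acc with
  | nil => simp
  | cons s t ih => simp [ih]

theorem pvFoldl_min_le_init (l : List Int) (a : Int) : l.foldl min a ≤ a := by
  induction l generalizing a with
  | nil => simp
  | cons x t ih => exact le_trans (ih (min a x)) (min_le_left a x)

-- first element whose key equals the minimum = single-pass best-so-far with strict <
set_option maxRecDepth 8000 in
theorem pvMain (t : List (List Int)) (h : List Int) :
    ((h :: t).find? (fun s => pvKeyA s == (t.map pvKeyA).foldl min (pvKeyA h))).getD []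
      = t.foldl (fun best s => if pvKeyA s < pvKeyA best then s else best) h := by
  induction t generalizing h with
  | nil => simp [List.find?]
  | cons s t ih =>
    by_cases hlt : pvKeyA s < pvKeyA h
    · have hmin : min (pvKeyA h) (pvKeyA s) = pvKeyA s := min_eq_right (le_of_lt hlt)
      have hM : (t.map pvKeyA).foldl min (pvKeyA s) ≤ pvKeyA s := pvFoldl_min_le_init _ _
      have hne : (pvKeyA h == (t.map pvKeyA).foldl min (pvKeyA s)) = false := by
        simp only [beq_eq_false_iff_ne, ne_eq]; omega
      simp only [List.foldl_cons, if_pos hlt, List.map_cons, hmin]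
      rw [← ih s]
      simp [hne]
    · have hle : pvKeyA h ≤ pvKeyA s := by omega
      have hmin : min (pvKeyA h) (pvKeyA s) = pvKeyA h := min_eq_left hle
      simp only [List.foldl_cons, if_neg hlt, List.map_cons, hmin]
      rw [← ih h]
      have hM : (t.map pvKeyA).foldl min (pvKeyA h) ≤ pvKeyA h := pvFoldl_min_le_init _ _
      by_cases hh : pvKeyA h = (t.map pvKeyA).foldl min (pvKeyA h)
      · have hp : (pvKeyA h == (t.map pvKeyA).foldl min (pvKeyA h)) = true :=
          beq_iff_eq.mpr hh
        rw [List.find?_cons_of_pos (p := fun x => pvKeyA x == (t.map pvKeyA).foldl min (pvKeyA h)) (l := s :: t) hp,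
            List.find?_cons_of_pos (p := fun x => pvKeyA x == (t.map pvKeyA).foldl min (pvKeyA h)) (l := t) hp]
      · have hneh : (pvKeyA h == (t.map pvKeyA).foldl min (pvKeyA h)) = false := by
          simp only [beq_eq_false_iff_ne, ne_eq]; exact hh
        have hnes : (pvKeyA s == (t.map pvKeyA).foldl min (pvKeyA h)) = false := by
          simp only [beq_eq_false_iff_ne, ne_eq]; omega
        simp [hneh, hnes]

-- ===== VERDICT (by name: the statement is the Claim_ definition above) =====
theorem GetMinErrPrediction_spec : Claim_equal_GetMinErrPrediction := by
  intro l _ hpre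
  unfold Spec_GetMinErrPrediction
  obtain ⟨hne, -⟩ := hpre
  match l with
  | [] => exact absurd rfl hne
  | h :: t =>
    unfold GetMinErrPrediction GetMinErrPrediction_alt
    simp only [pvFoldl_append_eq_map, List.nil_append, List.map_cons,
      PySem.List.min?_id_cons, Option.getD_some]
    exact pvMain t h
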